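-- pv_equiv track=rewrite | github.com/brianstrauch/google-code-jam | 2020/a.py | repeating_cols
-- ===== SOURCE A (Python) =====
-- def repeating_cols(arr):
--   c = 0
--   for j in range(len(arr)):
--     seen = set()
--     for i in range(len(arr)):
--       if arr[i][j] in seen:
--         c += 1
--         break
--       else:
--         seen.add(arr[i][j])
--   return c
-- ===== SOURCE B (Python) =====
-- def repeating_cols(arr):
--   n = len(arr)
--   c = 0
--   for j in range(n):
--     s = sorted(arr[i][j] for i in range(n))
--     if any(x == y for x, y in zip(s, s[1:])):
--       c += 1
--   return c
-- ===== Notes on version B (the rewrite author's own statement) =====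
-- stated objective: alternative
-- what changed: Per column, A detects a duplicate with a growing hash set and an early break; B builds the column, sorts it, and checks for an equal adjacent pair.
-- outside the precondition, e.g. on repeating_cols([[1, 1, 1], [1, 1, 1], [0]]): A returns 3, B raises IndexError
import Mathlib
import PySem

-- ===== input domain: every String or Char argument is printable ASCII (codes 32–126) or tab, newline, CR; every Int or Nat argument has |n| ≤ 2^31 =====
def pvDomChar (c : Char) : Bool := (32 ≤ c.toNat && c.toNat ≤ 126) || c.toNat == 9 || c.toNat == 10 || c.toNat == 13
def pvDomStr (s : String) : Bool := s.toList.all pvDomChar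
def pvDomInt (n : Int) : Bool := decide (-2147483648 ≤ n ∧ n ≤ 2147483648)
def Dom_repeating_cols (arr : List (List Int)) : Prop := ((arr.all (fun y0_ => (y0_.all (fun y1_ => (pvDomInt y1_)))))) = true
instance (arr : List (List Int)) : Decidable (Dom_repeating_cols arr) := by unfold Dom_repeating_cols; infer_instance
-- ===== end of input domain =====

-- B replaces A's hash-set early-break duplicate detection per column by sort-then-adjacent-scan (objective: alternative, same value).

-- ===== PORT A =====
-- inner 'for i in range(len(arr))' loop with the seen-set and break:
-- returns 1 if a duplicate is found (break with c += 1), else 0.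
-- The '.getD 0' is unreachable under Pre_ (Python raises IndexError there).
def pvLoopA (arr : List (List Int)) (j : Int) : List Int → PySem.Set Int → Int
  | [], _ => 0
  | i :: rest, seen =>
    let v := ((PySem.List.pyGet? arr i).bind (fun row => PySem.List.pyGet? row j)).getD 0
    if PySem.Set.contains seen v then 1
    else pvLoopA arr j rest (PySem.Set.add seen v)

def repeating_cols (arr : List (List Int)) : Int :=
  (PySem.List.pyRange 0 arr.length 1).foldl
    (fun c j => c + pvLoopA arr j (PySem.List.pyRange 0 arr.length 1) PySem.Set.empty) 0

-- ===== PORT B =====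
-- any(x == y for x, y in zip(s, s[1:]))
def pvHasAdj (s : List Int) : Bool := (s.zip (s.drop 1)).any (fun p => p.1 == p.2)

def repeating_cols_alt (arr : List (List Int)) : Int :=
  (PySem.List.pyRange 0 arr.length 1).foldl
    (fun c j =>
      -- sorted(arr[i][j] for i in range(n)); '.getD 0' unreachable under Pre_
      let s := PySem.List.sorted
        ((PySem.List.pyRange 0 arr.length 1).map
          (fun i => ((PySem.List.pyGet? arr i).bind (fun row => PySem.List.pyGet? row j)).getD 0))
        (fun x => x) false
      if pvHasAdj s then c + 1 else c) 0

-- ===== PRECONDITION & SPEC =====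
-- Pre_ excludes ragged inputs that have a row shorter than len(arr): there Python A raises
-- IndexError unless an earlier duplicate happens to break out of every column first (an accident
-- of A's early exit), and B raises IndexError.
def Pre_repeating_cols (arr : List (List Int)) : Prop :=
  ∀ row ∈ arr, arr.length ≤ row.length
instance (arr : List (List Int)) : Decidable (Pre_repeating_cols arr) := by
  unfold Pre_repeating_cols; infer_instance

def pvWitness_repeating_cols : List (List Int) := [[1, 2], [1, 4]]

def Spec_repeating_cols (arr : List (List Int)) (out : Int) : Prop := out = repeating_cols_alt arr
instance (arr : List (List Int)) (out : Int) : Decidable (Spec_repeating_cols arr out) := by unfold Spec_repeating_cols; infer_instance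

-- ===== CLAIM (what is proved, stated in full; the proofs are below) =====
def Claim_equal_repeating_cols : Prop := ∀ (arr : List (List Int)), Dom_repeating_cols arr → Pre_repeating_cols arr → Spec_repeating_cols arr (repeating_cols arr)

-- ===== LEMMAS AND PROOFS =====

-- A's inner loop returns 0 iff the values it traverses (prefixed by the seen set) are all distinct.
theorem pvLoopA_char (arr : List (List Int)) (j : Int) (l : List Int)
    (seen : PySem.Set Int) (h : seen.Nodup) :
    pvLoopA arr j l seen =
      if (seen ++ l.map (fun i =>
            ((PySem.List.pyGet? arr i).bind (fun row => PySem.List.pyGet? row j)).getD 0)).Nodup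
      then 0 else 1 := by
  induction l generalizing seen with
  | nil => simp [pvLoopA, h]
  | cons i rest ih =>
    simp only [pvLoopA, List.map_cons]
    set v := ((PySem.List.pyGet? arr i).bind (fun row => PySem.List.pyGet? row j)).getD 0 with hv
    by_cases hm : v ∈ seen
    · rw [if_pos ((PySem.Set.contains_iff seen v).mpr hm), if_neg]
      intro hnd
      rcases List.nodup_append.mp hnd with ⟨-, -, hdisj⟩
      exact hdisj v hm v List.mem_cons_self rfl
    · rw [if_neg (fun hc => hm ((PySem.Set.contains_iff seen v).mp hc))]
      have hadd : PySem.Set.add seen v = seen ++ [v] := PySem.Set.add_of_not_mem hm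
      have hnd' : (PySem.Set.add seen v).Nodup := by
        rw [hadd, List.nodup_append]
        refine ⟨h, List.nodup_singleton v, ?_⟩
        intro a ha b hb
        simp at hb
        subst hb
        exact fun he => hm (he ▸ ha)
      rw [ih _ hnd', hadd]
      simp only [List.append_assoc, List.singleton_append]
      exact rfl

-- adjacent-equal scan on a ≤-sorted list detects exactly the non-Nodup lists
theorem pvHasAdj_sorted (s : List Int) (hs : s.Pairwise (· ≤ ·)) :
    pvHasAdj s = false ↔ s.Nodup := by
  induction s with
  | nil => simp [pvHasAdj]
  | cons a t ih =>
    cases t with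
    | nil => simp [pvHasAdj]
    | cons b u =>
      have hpa : a ≤ b ∧ ∀ x ∈ u, a ≤ x := by
        have := List.pairwise_cons.mp hs
        exact ⟨this.1 b (by simp), fun x hx => this.1 x (by simp [hx])⟩
      have htl : (b :: u).Pairwise (· ≤ ·) := (List.pairwise_cons.mp hs).2
      have hIH := ih htl
      constructor
      · intro hfalse
        have h1 : (a == b) = false ∧ pvHasAdj (b :: u) = false := by
          simp [pvHasAdj] at hfalse ⊢
          exact ⟨fun h => absurd h hfalse.1, by
            intro x y hxy
            exact hfalse.2 x y hxy⟩
        have hne : a ≠ b := by simpa using h1.1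
        have hnd : (b :: u).Nodup := hIH.mp h1.2
        refine List.nodup_cons.mpr ⟨?_, hnd⟩
        intro hmem
        rcases List.mem_cons.mp hmem with h | h
        · exact hne h
        · -- a ∈ u, but b ≤ a (pairwise of tail) and a ≤ b ⇒ a = b
          have hba : b ≤ a := (List.pairwise_cons.mp htl).1 a h
          exact hne (le_antisymm hpa.1 hba)
      · intro hnd
        have hne : a ≠ b := by
          intro h; subst h
          exact (List.nodup_cons.mp hnd).1 (by simp)
        have htnd := (List.nodup_cons.mp hnd).2
        have := hIH.mpr htnd
        simp [pvHasAdj] at this ⊢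
        refine ⟨hne, ?_⟩
        intro x y hxy
        exact this x y hxy

-- per-column agreement: A's inner loop = B's sort-and-scan indicator
theorem pvCol_eq (arr : List (List Int)) (j : Int) :
    pvLoopA arr j (PySem.List.pyRange 0 arr.length 1) PySem.Set.empty =
      (if pvHasAdj (PySem.List.sorted
          ((PySem.List.pyRange 0 arr.length 1).map
            (fun i => ((PySem.List.pyGet? arr i).bind (fun row => PySem.List.pyGet? row j)).getD 0))
          (fun x => x) false)
       then 1 else 0) := by
  set col := (PySem.List.pyRange 0 arr.length 1).map
      (fun i => ((PySem.List.pyGet? arr i).bind (fun row => PySem.List.pyGet? row j)).getD 0) with hcol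
  have hA : pvLoopA arr j (PySem.List.pyRange 0 arr.length 1) PySem.Set.empty =
      if col.Nodup then 0 else 1 := by
    have := pvLoopA_char arr j (PySem.List.pyRange 0 arr.length 1) PySem.Set.empty (by simp [PySem.Set.empty])
    simpa [PySem.Set.empty, hcol] using this
  have hperm : (PySem.List.sorted col (fun x => x) false).Perm col := PySem.List.sorted_perm _ _ _
  have hpair : (PySem.List.sorted col (fun x => x) false).Pairwise (· ≤ ·) := by
    simpa using PySem.List.sorted_pairwise col (fun x => x)
  have hB := pvHasAdj_sorted _ hpair
  rw [hA]
  by_cases hadj : pvHasAdj (PySem.List.sorted col (fun x => x) false) = true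
  · have hnn : ¬ col.Nodup := by
      intro hc
      have hf := hB.mpr (hperm.nodup_iff.mpr hc)
      simp [hf] at hadj
    simp [hnn, hadj]
  · have hf : pvHasAdj (PySem.List.sorted col (fun x => x) false) = false := by
      simpa using hadj
    have hc : col.Nodup := hperm.nodup_iff.mp (hB.mp hf)
    simp [hc, hf]

-- ===== VERDICT (by name: the statement is the Claim_ definition above) =====
theorem repeating_cols_spec : Claim_equal_repeating_cols := by
  intro arr _ _
  unfold Spec_repeating_cols repeating_cols repeating_cols_alt
  apply PySem.List.foldl_congr_mem
  intro c j hj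
  rw [pvCol_eq]
  dsimp only
  split_ifs <;> omega
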